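-- pv_equiv track=rewrite | github.com/lenarother/advent-of-code | day_16.py | find_single_mapping
-- ===== SOURCE A (Python) =====
-- def find_single_mapping(mappings):
--     # Part 2
--     max_len = max(len(x) for x in mappings.values())
--     result = {}
--     taken = []
--
--     for counter in range(1, max_len + 1):
--         for k in mappings:
--             if len(mappings[k]) == counter:
--                 for id in mappings[k]:
--                     if id not in taken:
--                         result[k] = id
--                         taken.append(id)
--     return result
-- ===== SOURCE B (Python) =====
-- def find_single_mapping(mappings):
--     # Part 2 -- one stable sort by candidate-set size instead of a counter loop with full rescans
--     result = {}
--     taken = []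
--     for k, ids in sorted(mappings.items(), key=lambda kv: len(kv[1])):
--         for id in ids:
--             if id not in taken:
--                 result[k] = id
--                 taken.append(id)
--     return result
-- ===== Notes on version B (the rewrite author's own statement) =====
-- stated objective: alternative
-- what changed: A rescans the whole dict once per candidate-set size (counter = 1..max_len); B does one stable sort of the items by candidate-set size and then a single linear pass, with the same inner claiming loop (cost is dominated by that inner loop, so B is a different algorithm of similar measured cost).
import Mathlib
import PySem

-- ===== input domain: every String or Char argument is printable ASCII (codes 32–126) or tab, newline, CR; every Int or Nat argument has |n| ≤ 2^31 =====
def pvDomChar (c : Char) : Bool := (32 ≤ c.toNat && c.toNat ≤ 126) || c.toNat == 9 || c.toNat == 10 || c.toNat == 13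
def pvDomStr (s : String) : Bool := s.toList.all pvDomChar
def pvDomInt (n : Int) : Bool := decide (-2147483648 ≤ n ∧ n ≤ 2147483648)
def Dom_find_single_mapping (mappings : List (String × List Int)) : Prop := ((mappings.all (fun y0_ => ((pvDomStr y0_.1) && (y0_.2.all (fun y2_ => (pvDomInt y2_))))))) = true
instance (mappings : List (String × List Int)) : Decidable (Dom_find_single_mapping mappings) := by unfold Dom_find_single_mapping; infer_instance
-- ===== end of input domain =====

-- B replaces A's counter loop (one full rescan of all keys per candidate-set size) by a single
-- stable sort of the items by candidate-set size followed by one linear pass (objective: alternative).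

-- ===== PORT A =====
-- literal port of A: max over value lengths; then for counter in range(1, max_len+1),
-- for k in mappings, if len(mappings[k]) == counter, scan mappings[k] claiming every free id.
def find_single_mapping (mappings : List (String × List Int)) : List (String × Int) :=
  match PySem.List.max? (mappings.map (fun p => (p.2.length : Int))) (fun x => x) with
  | none => []   -- Python: max() of an empty sequence raises ValueError; excluded by Pre_
  | some maxLen =>
    ((PySem.List.pyRange 1 (maxLen + 1)).foldl (fun st counter =>
      mappings.foldl (fun st p =>
        if ((PySem.Dict.getD (⟨mappings⟩ : PySem.Dict String (List Int)) p.1 []).length : Int) = counter then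
          (PySem.Dict.getD (⟨mappings⟩ : PySem.Dict String (List Int)) p.1 []).foldl (fun st id =>
            if id ∈ st.2 then st else (st.1.insert p.1 id, st.2 ++ [id])) st
        else st) st)
      ((PySem.Dict.empty : PySem.Dict String Int), ([] : List Int))).1.items

-- ===== PORT B =====
-- literal port of Source B: one stable sort of the items by len(value), then one pass.
def find_single_mapping_alt (mappings : List (String × List Int)) : List (String × Int) :=
  ((PySem.List.sorted mappings (fun kv => kv.2.length)).foldl (fun st kv =>
      kv.2.foldl (fun st id =>
        if id ∈ st.2 then st else (st.1.insert kv.1 id, st.2 ++ [id])) st)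
    ((PySem.Dict.empty : PySem.Dict String Int), ([] : List Int))).1.items

-- ===== PRECONDITION & SPEC =====
-- Pre_ excludes the empty dict, on which A's max() raises ValueError, and association lists with
-- duplicate keys, which cannot arise from a Python dict — Python collapses duplicates before the
-- function ever runs, so any assoc-list behaviour of a port there is accidental.
def Pre_find_single_mapping (mappings : List (String × List Int)) : Prop :=
  mappings ≠ [] ∧ (mappings.map Prod.fst).Nodup
instance (mappings : List (String × List Int)) : Decidable (Pre_find_single_mapping mappings) := by unfold Pre_find_single_mapping; infer_instance
def pvWitness_find_single_mapping : (List (String × List Int)) :=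
  [("a", [1, 2]), ("b", [1]), ("c", [1, 2, 3])]
def Spec_find_single_mapping (mappings : List (String × List Int)) (out : List (String × Int)) : Prop := out = find_single_mapping_alt mappings
instance (mappings : List (String × List Int)) (out : List (String × Int)) : Decidable (Spec_find_single_mapping mappings out) := by unfold Spec_find_single_mapping; infer_instance

-- ===== CLAIM (what is proved, stated in full; the proofs are below) =====
def Claim_equal_find_single_mapping : Prop := ∀ (mappings : List (String × List Int)), Dom_find_single_mapping mappings → Pre_find_single_mapping mappings → Spec_find_single_mapping mappings (find_single_mapping mappings)

-- ===== LEMMAS AND PROOFS =====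

def fsmStep (st : PySem.Dict String Int × List Int) (kv : String × List Int) :
    PySem.Dict String Int × List Int :=
  kv.2.foldl (fun st id =>
    if id ∈ st.2 then st else (st.1.insert kv.1 id, st.2 ++ [id])) st


lemma insertBy_between {α : Type} (before : α → α → Bool) (x : α) (A B : List α)
    (hA : ∀ a ∈ A, before x a = false) (hB : ∀ b ∈ B, before x b = true) :
    PySem.List.insertBy before x (A ++ B) = A ++ x :: B := by
  induction A with
  | nil =>
    cases B with
    | nil => simp [PySem.List.insertBy]
    | cons b bs => simp [PySem.List.insertBy, hB b (by simp)]
  | cons a as ih =>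
    have ha := hA a (by simp)
    simp [PySem.List.insertBy, ha]
    exact ih (fun a ha' => hA a (by simp [ha']))

lemma sorted_eq_flatMap_filter {α : Type} (xs : List α) (key : α → Nat) (N : Nat)
    (h : ∀ a ∈ xs, key a < N) :
    PySem.List.sorted xs key =
      (List.range N).flatMap (fun c => xs.filter (fun a => key a = c)) := by
  induction xs using List.reverseRecOn with
  | nil => simp [PySem.List.sorted]
  | append_singleton xs x ih =>
    have hx : key x < N := h x (by simp)
    have ihx := ih (fun a ha => h a (by simp [ha]))
    rw [PySem.List.sorted_eq_foldl_insertBy] at *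
    rw [List.foldl_append, List.foldl_cons, List.foldl_nil, ihx]
    have hsplit : List.range N =
        List.range' 0 (key x) ++ ([key x] ++ List.range' (key x + 1) (N - (key x + 1))) := by
      rw [List.range_eq_range']
      have h2 : List.range' (key x) (N - key x) =
          key x :: List.range' (key x + 1) (N - (key x + 1)) := by
        have : N - key x = (N - (key x + 1)) + 1 := by omega
        rw [this, List.range'_succ]
      have h1 := List.range'_append (s := 0) (m := key x) (n := N - key x) (step := 1)
      simp only [Nat.one_mul, Nat.zero_add] at h1
      have hN : key x + (N - key x) = N := by omega
      rw [hN] at h1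
      rw [← h1, h2]
      simp
    rw [hsplit, List.flatMap_append, List.flatMap_append, List.flatMap_append, List.flatMap_append]
    have e1 : (List.range' 0 (key x)).flatMap (fun c => (xs ++ [x]).filter (fun a => key a = c)) =
        (List.range' 0 (key x)).flatMap (fun c => xs.filter (fun a => key a = c)) := by
      apply List.flatMap_congr
      intro c hc
      have : c < key x := by have := List.mem_range'_1.mp hc; omega
      rw [List.filter_append]
      simp [show ¬ (key x = c) by omega]
    have e2 : ([key x] : List Nat).flatMap (fun c => (xs ++ [x]).filter (fun a => key a = c)) =
        (xs.filter (fun a => key a = key x)) ++ [x] := by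
      simp [List.filter_append]
    have e3 : (List.range' (key x + 1) (N - (key x + 1))).flatMap (fun c => (xs ++ [x]).filter (fun a => key a = c)) =
        (List.range' (key x + 1) (N - (key x + 1))).flatMap (fun c => xs.filter (fun a => key a = c)) := by
      apply List.flatMap_congr
      intro c hc
      have : key x < c := by have := List.mem_range'_1.mp hc; omega
      rw [List.filter_append]
      simp [show ¬ (key x = c) by omega]
    rw [e1, e2, e3]
    have hins := insertBy_between (fun a b => decide (key a < key b)) x
      ((List.range' 0 (key x)).flatMap (fun c => xs.filter (fun a => key a = c)) ++
        ([key x] : List Nat).flatMap (fun c => xs.filter (fun a => key a = c)))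
      ((List.range' (key x + 1) (N - (key x + 1))).flatMap (fun c => xs.filter (fun a => key a = c)))
      (by
        intro a ha
        simp only [List.mem_append, List.mem_flatMap] at ha
        have : key a ≤ key x := by
          rcases ha with ⟨c, hc, ha⟩ | ha
          · have hcx : c < key x := by have := List.mem_range'_1.mp hc; omega
            have := (List.mem_filter.mp ha).2
            simp only [decide_eq_true_eq] at this
            omega
          · obtain ⟨c, hc, ha⟩ := ha
            simp only [List.mem_singleton] at hc
            subst hc
            have := (List.mem_filter.mp ha).2
            simp only [decide_eq_true_eq] at this
            omega
        simp only [decide_eq_false_iff_not]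
        omega)
      (by
        intro b hb
        simp only [List.mem_flatMap] at hb
        obtain ⟨c, hc, hb⟩ := hb
        have hcx : key x + 1 ≤ c := (List.mem_range'_1.mp hc).1
        have := (List.mem_filter.mp hb).2
        simp only [decide_eq_true_eq] at this
        simp only [decide_eq_true_eq]
        omega)
    rw [List.append_assoc] at hins
    rw [hins]
    simp


lemma foldl_flatMap_groups {α β σ : Type} (l : List α) (g : α → List β)
    (f : σ → β → σ) (init : σ) :
    List.foldl f init (l.flatMap g) = l.foldl (fun st c => (g c).foldl f st) init := by
  rw [List.flatMap_def, List.foldl_flatten, List.foldl_map]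

lemma foldl_fsmStep_empty (l : List (String × List Int)) (st : PySem.Dict String Int × List Int)
    (h : ∀ p ∈ l, p.2 = []) : l.foldl fsmStep st = st := by
  induction l generalizing st with
  | nil => rfl
  | cons p ps ih =>
    have hp : p.2 = [] := h p (by simp)
    simp only [List.foldl_cons]
    rw [show fsmStep st p = st by simp [fsmStep, hp]]
    exact ih st (fun q hq => h q (by simp [hq]))

lemma getD_mk_eq (mappings : List (String × List Int)) (p : String × List Int)
    (hp : p ∈ mappings) (hnd : (mappings.map Prod.fst).Nodup) :
    PySem.Dict.getD (⟨mappings⟩ : PySem.Dict String (List Int)) p.1 [] = p.2 := by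
  have h1 : (⟨mappings⟩ : PySem.Dict String (List Int)).get? p.1 = some p.2 := by
    apply PySem.Dict.get?_of_mem_items
    · simpa using hp
    · simpa [PySem.Dict.keys] using hnd
  simp [PySem.Dict.getD, h1]

lemma fsm_eq (mappings : List (String × List Int)) (hne : mappings ≠ [])
    (hnd : (mappings.map Prod.fst).Nodup) :
    find_single_mapping mappings = find_single_mapping_alt mappings := by
  cases hM : PySem.List.max? (mappings.map (fun p => (p.2.length : Int))) (fun x => x) with
  | none =>
    exact absurd (List.map_eq_nil_iff.mp ((PySem.List.max?_eq_none_iff _ _).mp hM)) hne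
  | some m =>
    simp only [find_single_mapping, hM]
    -- bounds on m
    have hub : ∀ p ∈ mappings, (p.2.length : Int) ≤ m := by
      intro p hp
      exact PySem.List.max?_isMax hM _ (List.mem_map_of_mem hp)
    -- rewrite A's getD lookups to the pair's own value, and its guarded scan to fsmStep on a filter
    have hA : ((PySem.List.pyRange 1 (m + 1)).foldl (fun st counter =>
        mappings.foldl (fun st p =>
          if ((PySem.Dict.getD (⟨mappings⟩ : PySem.Dict String (List Int)) p.1 []).length : Int) = counter then
            (PySem.Dict.getD (⟨mappings⟩ : PySem.Dict String (List Int)) p.1 []).foldl (fun st id =>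
              if id ∈ st.2 then st else (st.1.insert p.1 id, st.2 ++ [id])) st
          else st) st)
        ((PySem.Dict.empty : PySem.Dict String Int), ([] : List Int))) =
      ((PySem.List.pyRange 1 (m + 1)).foldl (fun st counter =>
        (mappings.filter (fun p => decide ((p.2.length : Int) = counter))).foldl fsmStep st)
        ((PySem.Dict.empty : PySem.Dict String Int), ([] : List Int))) := by
      apply PySem.List.foldl_congr_mem
      intro st c _
      rw [List.foldl_filter]
      apply PySem.List.foldl_congr_mem
      intro acc p hp
      rw [getD_mk_eq mappings p hp hnd]
      simp only [decide_eq_true_eq]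
      rfl
    rw [hA]
    -- turn the counter loop into one fold over the concatenated size-classes
    rw [← foldl_flatMap_groups]
    -- B's side: the stable sort is the concatenation of the size-classes
    have hN : ∀ p ∈ mappings, p.2.length < m.toNat + 1 := by
      intro p hp
      have := hub p hp
      omega
    simp only [find_single_mapping_alt]
    rw [show (fun (st : PySem.Dict String Int × List Int) (kv : String × List Int) =>
        kv.2.foldl (fun st id =>
          if id ∈ st.2 then st else (st.1.insert kv.1 id, st.2 ++ [id])) st) = fsmStep from rfl]
    rw [sorted_eq_flatMap_filter mappings (fun kv => kv.2.length) (m.toNat + 1) hN]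
    have hr : List.range (m.toNat + 1) = 0 :: List.range' 1 m.toNat := by
      rw [List.range_eq_range', List.range'_succ]
    rw [hr, List.flatMap_cons, List.foldl_append]
    rw [foldl_fsmStep_empty (mappings.filter (fun a => decide (a.2.length = 0)))
      ((PySem.Dict.empty : PySem.Dict String Int), ([] : List Int)) (by
        intro p hp
        have := (List.mem_filter.mp hp).2
        simp only [decide_eq_true_eq] at this
        exact List.length_eq_zero_iff.mp this)]
    -- both sides are now one fold over the same concatenation of size-classes
    congr 2
    rw [PySem.List.pyRange_one]
    have hm1 : (m + 1 - 1).toNat = m.toNat := by omega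
    rw [hm1, List.flatMap_map, List.range'_eq_map_range, List.flatMap_map]
    congr 1
    apply List.flatMap_congr
    intro k _
    apply List.filter_congr
    intro p _
    simp only [decide_eq_decide]
    omega


-- ===== VERDICT (by name: the statement is the Claim_ definition above) =====
theorem find_single_mapping_spec : Claim_equal_find_single_mapping :=
  fun mappings _ hpre => fsm_eq mappings hpre.1 hpre.2
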